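-- pv_equiv track=rewrite | github.com/yanyankangkang/Text-Mining | feature_hy.py | getVocabularyPrev
-- ===== SOURCE A (Python) =====
-- def getVocabularyPrev(content,k):
--     vocabulary = {}
--     index = 0
--     for i in range(len(content)):
--         if k > len(content[i]):
--             s = content[i]
--         else:
--             s = content[i][:k]
--         if s not in vocabulary:
--             vocabulary[s] = index
--             index = index + 1
--     return vocabulary
-- ===== SOURCE B (Python) =====
-- def getVocabularyPrev(content, k):
--     # Back-to-front overwrite maps each prefix to its first-occurrence position;
--     # sorting those positions recovers the insertion order without any counter.
--     ps = [x[:k] for x in content]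
--     first = {p: i for i, p in reversed(list(enumerate(ps)))}
--     return {p: j for j, p in enumerate(sorted(first, key=first.get))}
-- ===== Notes on version B (the rewrite author's own statement) =====
-- stated objective: alternative
-- what changed: Drops A's mutable counter and conditional insertion entirely: B maps each prefix to its first-occurrence position by overwriting a dict while traversing the list back-to-front, then sorts the prefixes by that position and enumerates them, so deduplication, ordering and index assignment come from overwrite semantics and a sort instead of a stateful seen-check loop.
import Mathlib
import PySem

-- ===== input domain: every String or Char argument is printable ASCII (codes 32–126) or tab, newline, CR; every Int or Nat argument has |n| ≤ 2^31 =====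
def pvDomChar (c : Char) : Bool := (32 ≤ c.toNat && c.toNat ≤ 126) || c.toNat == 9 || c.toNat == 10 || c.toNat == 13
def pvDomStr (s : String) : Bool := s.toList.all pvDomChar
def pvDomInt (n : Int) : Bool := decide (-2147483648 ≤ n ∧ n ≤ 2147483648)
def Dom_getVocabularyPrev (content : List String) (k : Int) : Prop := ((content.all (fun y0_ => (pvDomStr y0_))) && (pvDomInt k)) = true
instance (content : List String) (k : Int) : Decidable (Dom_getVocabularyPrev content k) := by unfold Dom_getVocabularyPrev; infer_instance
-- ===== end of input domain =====

-- B replaces A's stateful seen-check loop by a back-to-front overwrite dict plus a sort by first-occurrence position; alternative algorithm, similar cost.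


-- ===== PORT A =====
def getVocabularyPrev (content : List String) (k : Int) : List (String × Int) :=
  (((PySem.List.pyRange 0 (PySem.List.len content) 1).foldl
    (fun (st : PySem.Dict String Int × Int) i =>
      let ci := PySem.List.pyGetD content i ""
      let s := if k > PySem.Str.len ci then ci else PySem.Str.slice ci none (some k)
      if st.1.contains s then st else (st.1.insert s st.2, st.2 + 1))
    (PySem.Dict.empty, 0)).1).items

-- ===== PORT B =====
def getVocabularyPrev_alt (content : List String) (k : Int) : List (String × Int) :=
  let ps := content.map (fun x => PySem.Str.slice x none (some k))
  let first := ((PySem.List.enumerate ps).reverse).foldl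
      (fun (d : PySem.Dict String Int) q => d.insert q.2 q.1) PySem.Dict.empty
  (PySem.List.enumerate (PySem.List.sorted first.keys (fun p => first.getD p 0) false)).map
    (fun q => (q.2, q.1))

-- ===== PRECONDITION & SPEC =====
def Spec_getVocabularyPrev (content : List String) (k : Int) (out : List (String × Int)) : Prop := out = getVocabularyPrev_alt content k
instance (content : List String) (k : Int) (out : List (String × Int)) : Decidable (Spec_getVocabularyPrev content k out) := by unfold Spec_getVocabularyPrev; infer_instance

-- ===== CLAIM (what is proved, stated in full; the proofs are below) =====
def Claim_equal_getVocabularyPrev : Prop := ∀ (content : List String) (k : Int), Dom_getVocabularyPrev content k → Spec_getVocabularyPrev content k (getVocabularyPrev content k)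

-- ===== LEMMAS AND PROOFS =====

-- The k > len branch of A is redundant: slicing past the end yields the whole string.
theorem slice_all (s : String) (k : Int) (h : k > PySem.Str.len s) :
    PySem.Str.slice s none (some k) = s := by
  simp only [PySem.Str.len] at h
  have h0 : (0:Int) ≤ k := by omega
  have hlen : s.toList.length ≤ k.toNat := by omega
  simp [PySem.Str.slice, PySem.List.slice_to _ h0, List.take_of_length_le hlen, String.ofList]

-- The dict A has built after recording the distinct prefixes `seen` (in order).
def mkd (seen : List String) : PySem.Dict String Int :=
  PySem.Dict.mk ((PySem.List.enumerate seen 0).map (fun p => (p.2, p.1)))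

theorem contains_mkd (seen : List String) (s : String) :
    (mkd seen).contains s = seen.contains s := by
  rw [mkd, PySem.Dict.contains_mk, List.any_map,
    show ((fun (p : String × Int) => p.1 == s) ∘ (fun (p : Int × String) => (p.2, p.1)))
      = ((fun x => x == s) ∘ (fun (p : Int × String) => p.2)) from rfl,
    ← List.any_map, PySem.List.map_snd_enumerate]
  exact List.any_beq'

theorem enumerate_append_singleton (xs : List String) (x : String) : ∀ (s : Int),
    PySem.List.enumerate (xs ++ [x]) s = PySem.List.enumerate xs s ++ [(s + xs.length, x)] := by
  induction xs with
  | nil => intro s; simp [PySem.List.enumerate_nil, PySem.List.enumerate_cons]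
  | cons y ys ih =>
    intro s
    simp [PySem.List.enumerate_cons, ih (s + 1)]
    ring_nf

-- Loop invariant for A: from state (mkd seen, |seen|), A's fold lands at (mkd seen', |seen'|),
-- where seen' accumulates the unseen prefixes in order (PySem.Set.add).
theorem loop_state (k : Int) (m : List String) : ∀ (seen : List String),
    m.foldl (fun (st : PySem.Dict String Int × Int) ci =>
        let s := if k > PySem.Str.len ci then ci else PySem.Str.slice ci none (some k)
        if st.1.contains s then st else (st.1.insert s st.2, st.2 + 1))
      (mkd seen, (seen.length : Int))
    = (mkd ((m.map (fun x => PySem.Str.slice x none (some k))).foldl PySem.Set.add seen),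
       (((m.map (fun x => PySem.Str.slice x none (some k))).foldl PySem.Set.add seen).length : Int)) := by
  induction m with
  | nil => intro seen; simp
  | cons ci m ih =>
    intro seen
    have hs : (if k > PySem.Str.len ci then ci else PySem.Str.slice ci none (some k))
        = PySem.Str.slice ci none (some k) := by
      by_cases h : k > PySem.Str.len ci
      · rw [if_pos h, slice_all ci k h]
      · rw [if_neg h]
    simp only [List.foldl_cons, List.map_cons, hs, contains_mkd]
    by_cases hm : PySem.Str.slice ci none (some k) ∈ seen
    · have hc : seen.contains (PySem.Str.slice ci none (some k)) = true := by simpa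
      have ha : PySem.Set.add seen (PySem.Str.slice ci none (some k)) = seen := by
        simp [PySem.Set.add, hm]
      rw [if_pos hc, ha]
      exact ih seen
    · have hc : seen.contains (PySem.Str.slice ci none (some k)) = false := by simpa
      have ha : PySem.Set.add seen (PySem.Str.slice ci none (some k))
          = seen ++ [PySem.Str.slice ci none (some k)] := by
        simp [PySem.Set.add, hm]
      have hins : ((mkd seen).insert (PySem.Str.slice ci none (some k)) (seen.length : Int))
          = mkd (seen ++ [PySem.Str.slice ci none (some k)]) := by
        apply PySem.Dict.ext
        rw [PySem.Dict.items_insert_of_not_contains _ _ (by rw [contains_mkd]; exact hc)]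
        simp [mkd, enumerate_append_singleton]
      have hlen : ((seen.length : Int) + 1)
          = (((seen ++ [PySem.Str.slice ci none (some k)]).length : Int)) := by
        simp
      rw [if_neg (by simp [hm]), hins, hlen, ha]
      exact ih _

-- B's dict, built back-to-front: getD is the first-occurrence position, keys are the distinct prefixes.
def Fdict (ps : List String) (s : Int) : PySem.Dict String Int :=
  ((PySem.List.enumerate ps s).reverse).foldl
    (fun (d : PySem.Dict String Int) q => d.insert q.2 q.1) PySem.Dict.empty

theorem Fdict_cons (p : String) (ps : List String) (s : Int) :
    Fdict (p :: ps) s = (Fdict ps (s + 1)).insert p s := by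
  simp [Fdict, PySem.List.enumerate_cons, List.foldl_append]

theorem Fdict_getD (ps : List String) : ∀ (s : Int) (q : String) (v : Int),
    (Fdict ps s).getD q v = (match PySem.List.index? ps q with
      | some j => s + (j : Int)
      | none => v) := by
  induction ps with
  | nil => intro s q v; simp [Fdict, PySem.List.enumerate_nil, PySem.List.index?]
  | cons p ps ih =>
    intro s q v
    rw [Fdict_cons, PySem.Dict.getD_insert]
    by_cases h : q = p
    · subst h; rw [PySem.List.index?_cons_self]; simp
    · rw [if_neg h, ih, PySem.List.index?_cons_of_ne _ (fun e => h e.symm)]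
      cases hj : PySem.List.index? ps q with
      | none => simp
      | some j => simp; ring

theorem Fdict_mem_keys (ps : List String) : ∀ (s : Int) (q : String),
    q ∈ (Fdict ps s).keys ↔ q ∈ ps := by
  induction ps with
  | nil => intro s q; simp [Fdict, PySem.List.enumerate_nil, PySem.Dict.empty]
  | cons p ps ih =>
    intro s q
    rw [Fdict_cons, PySem.Dict.mem_keys_insert, ih]
    simp [eq_comm]

theorem Fdict_nodup_keys (ps : List String) (s : Int) : (Fdict ps s).keys.Nodup := by
  unfold Fdict
  exact PySem.Dict.nodup_keys_foldl_insert_key ((PySem.List.enumerate ps s).reverse)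
    (fun (q : Int × String) => q.2) (fun d q => q.1) PySem.Dict.empty
    PySem.Dict.nodup_keys_empty

-- The distinct prefixes, in first-occurrence order, have strictly increasing first positions.
theorem dedup_pw (ps : List String) :
    (PySem.Set.ofList ps).Pairwise
      (fun a b => ((PySem.List.index? ps a).getD 0 : Nat) < (PySem.List.index? ps b).getD 0) := by
  induction ps using List.reverseRecOn with
  | nil => simp [PySem.Set.ofList]
  | append_singleton ps p ih =>
    have hof : PySem.Set.ofList (ps ++ [p]) = PySem.Set.add (PySem.Set.ofList ps) p := by
      simp [PySem.Set.ofList_eq_foldl, List.foldl_append]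
    rw [hof]
    by_cases hp : p ∈ ps
    · have hadd : PySem.Set.add (PySem.Set.ofList ps) p = PySem.Set.ofList ps := by
        simp [PySem.Set.add, PySem.Set.contains, PySem.Set.mem_ofList, hp]
      rw [hadd]
      refine List.Pairwise.imp_of_mem (fun {a b} ha hb hr => ?_) ih
      rwa [PySem.List.index?_append_of_mem _ ((PySem.Set.mem_ofList _ _).1 ha),
        PySem.List.index?_append_of_mem _ ((PySem.Set.mem_ofList _ _).1 hb)]
    · have hadd : PySem.Set.add (PySem.Set.ofList ps) p = PySem.Set.ofList ps ++ [p] := by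
        simp [PySem.Set.add, PySem.Set.contains, PySem.Set.mem_ofList, hp]
      rw [hadd, List.pairwise_append]
      refine ⟨List.Pairwise.imp_of_mem (fun {a b} ha hb hr => ?_) ih, List.pairwise_singleton _ _,
        fun a ha b hb => ?_⟩
      · rwa [PySem.List.index?_append_of_mem _ ((PySem.Set.mem_ofList _ _).1 ha),
          PySem.List.index?_append_of_mem _ ((PySem.Set.mem_ofList _ _).1 hb)]
      · rw [List.mem_singleton] at hb; subst hb
        rw [PySem.List.index?_append_of_mem _ ((PySem.Set.mem_ofList _ _).1 ha),
          PySem.List.index?_append_singleton_self _ _ hp]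
        have ham := (PySem.Set.mem_ofList _ _).1 ha
        cases hj : PySem.List.index? ps a with
        | none => exact absurd ((PySem.List.index?_eq_none_iff _ _).1 hj) (by simpa using ham)
        | some j =>
          obtain ⟨hk, -, -⟩ := PySem.List.getElem_of_index?_eq_some hj
          simpa using hk

-- Sorting the keys by first position is exactly the ordered set of prefixes.
theorem sorted_keys (ps : List String) :
    PySem.List.sorted (Fdict ps 0).keys (fun p => (Fdict ps 0).getD p 0) false
      = PySem.Set.ofList ps := by
  apply PySem.List.sorted_eq_of_perm_of_pairwise_lt
  · rw [List.perm_ext_iff_of_nodup (PySem.Set.nodup_ofList _) (Fdict_nodup_keys ps 0)]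
    intro a
    rw [PySem.Set.mem_ofList, Fdict_mem_keys]
  · refine List.Pairwise.imp_of_mem (fun {a b} ha hb hr => ?_) (dedup_pw ps)
    rw [Fdict_getD, Fdict_getD]
    have hma := (PySem.Set.mem_ofList _ _).1 ha
    have hmb := (PySem.Set.mem_ofList _ _).1 hb
    cases hja : PySem.List.index? ps a with
    | none => exact absurd ((PySem.List.index?_eq_none_iff _ _).1 hja) (by simpa using hma)
    | some ja =>
      cases hjb : PySem.List.index? ps b with
      | none => exact absurd ((PySem.List.index?_eq_none_iff _ _).1 hjb) (by simpa using hmb)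
      | some jb =>
        rw [hja, hjb] at hr
        simp at hr ⊢
        omega

-- ===== VERDICT (by name: the statement is the Claim_ definition above) =====
theorem getVocabularyPrev_spec : Claim_equal_getVocabularyPrev := by
  intro content k _
  unfold Spec_getVocabularyPrev getVocabularyPrev getVocabularyPrev_alt
  rw [PySem.List.foldl_pyRange_zero_pyGetD content ""
    (fun (st : PySem.Dict String Int × Int) ci =>
      let s := if k > PySem.Str.len ci then ci else PySem.Str.slice ci none (some k)
      if st.1.contains s then st else (st.1.insert s st.2, st.2 + 1))]
  have h0 : ((PySem.Dict.empty : PySem.Dict String Int), (0:Int))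
      = (mkd [], (([] : List String).length : Int)) := by
    simp [mkd, PySem.Dict.empty, PySem.List.enumerate_nil]
  rw [h0, loop_state]
  show (mkd ((content.map (fun x => PySem.Str.slice x none (some k))).foldl PySem.Set.add [])).items
      = (PySem.List.enumerate (PySem.List.sorted
          (Fdict (content.map (fun x => PySem.Str.slice x none (some k))) 0).keys
          (fun p => (Fdict (content.map (fun x => PySem.Str.slice x none (some k))) 0).getD p 0)
          false)).map (fun q => (q.2, q.1))
  rw [sorted_keys]
  simp [mkd, PySem.Set.ofList_eq_foldl]
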